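-- pv_equiv track=rewrite | github.com/OzCog/language-learning | src/parse_evaluator/parse_evaluator.py | Make_Sequential
-- ===== SOURCE A (Python) =====
-- def Make_Sequential(sents):
--     """
--         Make sequential parses (each word simply linked to the next one),
--         to use as a benchmark
--     """
--     sequential_parses = []
--     for sent in sents:
--         parse = [["0", "###LEFT-WALL###", "1", sent[0]]] # include left-wall
--         for i in range(1, len(sent)):
--             parse.append([str(i), sent[i - 1], str(i + 1), sent[i]])
--         #parse.append([str(i), sent[i - 1], str(i + 1), sent[i]] for i in range(1, len(sent)))
--         sequential_parses.append(parse)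
--
--     return sequential_parses
-- ===== SOURCE B (Python) =====
-- def Make_Sequential(sents):
--     """
--         Make sequential parses (each word simply linked to the next one),
--         to use as a benchmark
--     """
--     def link(prev, k, rest):
--         # one row per remaining word, carrying the previous word along;
--         # no list indexing at all
--         if not rest:
--             return []
--         return [[str(k), prev, str(k + 1), rest[0]]] + link(rest[0], k + 1, rest[1:])
--
--     if not sents:
--         return []
--     return [link("###LEFT-WALL###", 0, sents[0])] + Make_Sequential(sents[1:])
-- ===== Notes on version B (the rewrite author's own statement) =====
-- stated objective: alternative
-- what changed: B replaces A's index loop with a special-cased first row by pure structural recursion: a helper recurses down the cons-list carrying the previous word (the left-wall as the initial carried word), and the outer level recurses over the sentence list, with no list indexing anywhere.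
import Mathlib
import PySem

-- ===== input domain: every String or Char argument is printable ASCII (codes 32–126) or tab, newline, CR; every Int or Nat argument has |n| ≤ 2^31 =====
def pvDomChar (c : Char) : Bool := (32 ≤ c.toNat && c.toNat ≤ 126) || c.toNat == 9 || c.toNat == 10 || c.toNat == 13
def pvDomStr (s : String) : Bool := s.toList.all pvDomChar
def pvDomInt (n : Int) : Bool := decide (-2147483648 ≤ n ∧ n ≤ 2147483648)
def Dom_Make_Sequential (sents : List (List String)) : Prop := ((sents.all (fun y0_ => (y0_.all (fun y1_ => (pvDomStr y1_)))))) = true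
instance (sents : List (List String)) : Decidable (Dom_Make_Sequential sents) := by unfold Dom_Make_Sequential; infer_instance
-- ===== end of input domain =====

-- B replaces A's index loop (with its special-cased first row) by structural recursion
-- carrying the previous word; an alternative decomposition, same cost. Pre_ excludes
-- inputs with an empty sentence, where A raises IndexError.


-- ===== PORT A =====
def Make_Sequential (sents : List (List String)) : List (List (List String)) :=
  sents.foldl (fun seq sent =>
    seq ++ [ (PySem.List.pyRange 1 (sent.length : Int) 1).foldl
      (fun parse i => parse ++
        [[PySem.Int.toStr i, PySem.List.pyGetD sent (i - 1) "",
          PySem.Int.toStr (i + 1), PySem.List.pyGetD sent i ""]])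
      [["0", "###LEFT-WALL###", "1", PySem.List.pyGetD sent 0 ""]] ]) []

-- ===== PORT B =====
-- helper `link` of Source B: recursion on the cons-list, carrying the previous word
def pvLink (prev : String) (k : Int) (rest : List String) : List (List String) :=
  match rest with
  | [] => []
  | x :: xs => [PySem.Int.toStr k, prev, PySem.Int.toStr (k + 1), x] :: pvLink x (k + 1) xs

def Make_Sequential_alt (sents : List (List String)) : List (List (List String)) :=
  match sents with
  | [] => []
  | s :: rest => pvLink "###LEFT-WALL###" 0 s :: Make_Sequential_alt rest

-- ===== PRECONDITION & SPEC =====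
-- Pre_ excludes inputs containing an empty sentence: there A raises IndexError (sent[0]).
def Pre_Make_Sequential (sents : List (List String)) : Prop := ∀ s ∈ sents, s ≠ []
instance (sents : List (List String)) : Decidable (Pre_Make_Sequential sents) := by unfold Pre_Make_Sequential; infer_instance
def pvWitness_Make_Sequential : List (List String) := [["a", "b"], ["x"]]

def Spec_Make_Sequential (sents : List (List String)) (out : List (List (List String))) : Prop := out = Make_Sequential_alt sents
instance (sents : List (List String)) (out : List (List (List String))) : Decidable (Spec_Make_Sequential sents out) := by unfold Spec_Make_Sequential; infer_instance

-- ===== CLAIM (what is proved, stated in full; the proofs are below) =====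
def Claim_equal_Make_Sequential : Prop := ∀ (sents : List (List String)), Dom_Make_Sequential sents → Pre_Make_Sequential sents → Spec_Make_Sequential sents (Make_Sequential sents)
-- ===== LEMMAS AND PROOFS =====

-- canonical per-sentence parse: row k links word k-1 (left-wall augmented) to word k
def pvCanon (sent : List String) : List (List String) :=
  (List.range sent.length).map (fun (k : Nat) =>
    [PySem.Int.toStr (k : Int), ("###LEFT-WALL###" :: sent).getD k "",
     PySem.Int.toStr ((k : Int) + 1), sent.getD k ""])

lemma pvLink_eq (l : List String) : ∀ (prev : String) (s : Int),
    pvLink prev s l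
    = (List.range l.length).map (fun (k : Nat) =>
        [PySem.Int.toStr (s + k), (prev :: l).getD k "",
         PySem.Int.toStr (s + k + 1), l.getD k ""]) := by
  induction l with
  | nil => intro prev s; simp [pvLink]
  | cons x xs ih =>
    intro prev s
    simp only [pvLink, List.length_cons, List.range_succ_eq_map, List.map_cons, List.map_map]
    refine List.cons_eq_cons.mpr ⟨by simp, ?_⟩
    rw [ih x (s + 1)]
    apply List.map_congr_left
    intro k _
    simp only [Function.comp]
    have h1 : s + 1 + (k : Int) = s + ((k + 1 : Nat) : Int) := by omega
    simp [h1, List.getD]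

lemma pvB_canon (sent : List String) :
    pvLink "###LEFT-WALL###" 0 sent = pvCanon sent := by
  rw [pvLink_eq sent "###LEFT-WALL###" 0, pvCanon]
  apply List.map_congr_left
  intro k _
  simp

lemma pvA_canon (sent : List String) (h : sent ≠ []) :
    (PySem.List.pyRange 1 (sent.length : Int) 1).foldl
      (fun parse i => parse ++
        [[PySem.Int.toStr i, PySem.List.pyGetD sent (i - 1) "",
          PySem.Int.toStr (i + 1), PySem.List.pyGetD sent i ""]])
      [["0", "###LEFT-WALL###", "1", PySem.List.pyGetD sent 0 ""]]
    = pvCanon sent := by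
  obtain ⟨w, ws, rfl⟩ := List.exists_cons_of_ne_nil h
  rw [PySem.List.foldl_append_singleton_eq_map, PySem.List.pyRange_one]
  have hlen : ((((w :: ws).length : Int)) - 1).toNat = ws.length := by
    simp
  rw [hlen, pvCanon]
  simp only [List.length_cons, List.range_succ_eq_map, List.map_cons, List.map_map]
  refine List.cons_eq_cons.mpr ⟨?_, ?_⟩
  · simp [PySem.List.pyGetD_zero_cons, List.getD,
      show PySem.Int.toStr 0 = "0" by decide, show PySem.Int.toStr 1 = "1" by decide]
  apply List.map_congr_left
  intro k _
  simp only [Function.comp]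
  have h1 : (1 : Int) + (k : Int) = ((k + 1 : Nat) : Int) := by omega
  have h2 : (1 : Int) + (k : Int) - 1 = ((k : Nat) : Int) := by omega
  rw [h2, h1]
  simp only [PySem.List.pyGetD_natCast]
  simp [List.getD]

lemma pvAlt_map (sents : List (List String)) :
    Make_Sequential_alt sents = sents.map (fun s => pvLink "###LEFT-WALL###" 0 s) := by
  induction sents with
  | nil => simp [Make_Sequential_alt]
  | cons s rest ih => simp [Make_Sequential_alt, ih]

-- ===== VERDICT (by name: the statement is the Claim_ definition above) =====
theorem Make_Sequential_spec : Claim_equal_Make_Sequential := by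
  intro sents _ hpre
  unfold Spec_Make_Sequential Make_Sequential
  rw [pvAlt_map, PySem.List.foldl_append_singleton_eq_map]
  apply List.map_congr_left
  intro sent hmem
  rw [pvA_canon sent (hpre sent hmem), pvB_canon]
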